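-- pv_equiv track=rewrite | github.com/jamesstocktonj1/Writing-Bach | KeyFinder/keyfinder.py | findSimular
-- ===== SOURCE A (Python) =====
-- def findSimular(keyArr, testArr):
--     simularNotes = []
--
--     #increments through each note in the inputed array
--     for note in testArr:
--
--         #increments through each octave
--         for i in range(0, 11):
--
--             #increments through each note in the test array
--             for compareNote in keyArr:
--
--                 if note == compareNote + (12 * i):
--                     simularNotes.append(note)
--
--     return simularNotes
-- ===== SOURCE B (Python) =====
-- def findSimular(keyArr, testArr):
--     # Build a frequency table of each key note transposed through the 11 octaves,
--     # then emit each test note as many times as the table counts it.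
--     table = {}
--     for i in range(0, 11):
--         for compareNote in keyArr:
--             shifted = compareNote + 12 * i
--             table[shifted] = table.get(shifted, 0) + 1
--     simularNotes = []
--     for note in testArr:
--         simularNotes.extend([note] * table.get(note, 0))
--     return simularNotes
-- ===== Notes on version B (the rewrite author's own statement) =====
-- stated objective: faster
-- what changed: Replaces the triple-nested rescan with a frequency table built once over keyArr x 11 octaves, then a single pass over testArr emitting each note table[note] times.
import Mathlib
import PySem

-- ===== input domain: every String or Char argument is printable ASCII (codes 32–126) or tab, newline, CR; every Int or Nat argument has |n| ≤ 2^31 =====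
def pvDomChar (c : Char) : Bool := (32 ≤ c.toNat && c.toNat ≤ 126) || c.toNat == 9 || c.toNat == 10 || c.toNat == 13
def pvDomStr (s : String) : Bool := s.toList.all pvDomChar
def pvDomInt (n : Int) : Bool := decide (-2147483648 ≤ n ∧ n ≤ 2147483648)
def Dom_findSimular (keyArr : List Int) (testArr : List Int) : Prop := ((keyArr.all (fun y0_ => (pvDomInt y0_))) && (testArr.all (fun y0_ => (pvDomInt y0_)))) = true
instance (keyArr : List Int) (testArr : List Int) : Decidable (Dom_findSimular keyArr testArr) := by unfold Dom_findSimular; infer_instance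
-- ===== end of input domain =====

-- B replaces A's triple-nested rescan by a frequency table over keyArr x 11 octaves followed by one pass over testArr (faster).


-- ===== PORT A =====
def findSimular (keyArr : List Int) (testArr : List Int) : List Int :=
  testArr.foldl (fun simularNotes note =>
    (PySem.List.pyRange 0 11 1).foldl (fun simularNotes i =>
      keyArr.foldl (fun simularNotes compareNote =>
        if note == compareNote + 12 * i then simularNotes ++ [note] else simularNotes)
        simularNotes)
      simularNotes)
    []

-- ===== PORT B =====
def findSimular_alt (keyArr : List Int) (testArr : List Int) : List Int :=
  let table : PySem.Dict Int Int :=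
    (PySem.List.pyRange 0 11 1).foldl (fun table i =>
      keyArr.foldl (fun table compareNote =>
        let shifted := compareNote + 12 * i
        table.insert shifted (table.getD shifted 0 + 1))
        table)
      PySem.Dict.empty
  testArr.foldl (fun simularNotes note =>
    simularNotes ++ List.replicate (table.getD note 0).toNat note)
    []

-- ===== PRECONDITION & SPEC =====
def Spec_findSimular (keyArr : List Int) (testArr : List Int) (out : List Int) : Prop := out = findSimular_alt keyArr testArr
instance (keyArr : List Int) (testArr : List Int) (out : List Int) : Decidable (Spec_findSimular keyArr testArr out) := by unfold Spec_findSimular; infer_instance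

-- ===== CLAIM (what is proved, stated in full; the proofs are below) =====
def Claim_equal_findSimular : Prop := ∀ (keyArr : List Int) (testArr : List Int), Dom_findSimular keyArr testArr → Spec_findSimular keyArr testArr (findSimular keyArr testArr)

-- ===== LEMMAS AND PROOFS =====

-- A's innermost loop appends `note` once per matching shifted key note
lemma innerKey (keyArr : List Int) (note i : Int) (acc : List Int) :
    keyArr.foldl (fun acc c => if note == c + 12 * i then acc ++ [note] else acc) acc
    = acc ++ List.replicate ((keyArr.map (fun c => c + 12 * i)).count note) note := by
  rw [PySem.List.foldl_append_if (p := fun c => note == c + 12 * i) (f := fun _ => note)]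
  congr 1
  rw [List.map_const']
  congr 1
  rw [← List.countP_eq_length_filter, List.count, List.countP_map]
  apply List.countP_congr
  intro c _
  simp [Bool.beq_comm]

-- A's inner two loops append `note` once per matching stream element
lemma innerA (keyArr : List Int) (note : Int) :
    ∀ (l : List Int) (acc : List Int),
      l.foldl (fun acc i =>
        keyArr.foldl (fun acc c => if note == c + 12 * i then acc ++ [note] else acc) acc) acc
      = acc ++ List.replicate ((l.flatMap (fun i => keyArr.map (fun c => c + 12 * i))).count note) note := by
  intro l
  induction l with
  | nil => intro acc; simp
  | cons i rest ih =>
      intro acc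
      rw [List.foldl_cons, innerKey, ih, List.flatMap_cons, List.count_append,
        List.replicate_add, List.append_assoc]

-- B's table counts occurrences in the stream
lemma tableCount (keyArr : List Int) (v : Int) :
    ∀ (l : List Int) (d : PySem.Dict Int Int),
      (l.foldl (fun table i =>
        keyArr.foldl (fun table c =>
          let shifted := c + 12 * i
          table.insert shifted (table.getD shifted 0 + 1)) table) d).getD v 0
      = d.getD v 0 + (l.flatMap (fun i => keyArr.map (fun c => c + 12 * i))).count v := by
  intro l
  induction l with
  | nil => intro d; simp
  | cons i rest ih =>
      intro d
      have hmap : keyArr.foldl (fun table c =>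
            let shifted := c + 12 * i
            table.insert shifted (table.getD shifted 0 + 1)) d
          = (keyArr.map (fun c => c + 12 * i)).foldl
              (fun table x => table.insert x (table.getD x 0 + 1)) d := by
        rw [List.foldl_map]
      rw [List.foldl_cons, ih, hmap, PySem.Dict.getD_foldl_insert_add_one,
        List.flatMap_cons, List.count_append]
      push_cast
      ring

-- ===== VERDICT (by name: the statement is the Claim_ definition above) =====
theorem findSimular_spec : Claim_equal_findSimular := by
  intro keyArr testArr _
  unfold Spec_findSimular findSimular findSimular_alt
  apply PySem.List.foldl_congr_mem
  intro acc note _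
  rw [innerA keyArr note]
  have h := tableCount keyArr note (PySem.List.pyRange 0 11 1) PySem.Dict.empty
  simp only [PySem.Dict.getD_empty, zero_add] at h
  rw [h]
  simp
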